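-- pv_equiv track=rewrite | github.com/PasinduDushan/sentinel | dashboard.py | extract_ai_state
-- ===== SOURCE A (Python) =====
-- def extract_ai_state(lines):
--     ai_line = ""
--     learning_line = ""
--     for line in reversed(lines):
--         if "[Sentinel] AI mode=" in line:
--             ai_line = line
--             break
--     for line in reversed(lines):
--         if "learning=" in line and "[AI Engine]" in line:
--             learning_line = line
--             break
--     return ai_line, learning_line
-- ===== SOURCE B (Python) =====
-- def extract_ai_state(lines):
--     ai_line = ""
--     learning_line = ""
--     for line in lines:
--         if "[Sentinel] AI mode=" in line:
--             ai_line = line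
--         if "learning=" in line and "[AI Engine]" in line:
--             learning_line = line
--     return ai_line, learning_line
-- ===== Notes on version B (the rewrite author's own statement) =====
-- stated objective: simpler
-- what changed: Replaces A's two separate reversed scans with early break by one forward pass that overwrites each result variable on every match, so the last match survives.
import Mathlib
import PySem

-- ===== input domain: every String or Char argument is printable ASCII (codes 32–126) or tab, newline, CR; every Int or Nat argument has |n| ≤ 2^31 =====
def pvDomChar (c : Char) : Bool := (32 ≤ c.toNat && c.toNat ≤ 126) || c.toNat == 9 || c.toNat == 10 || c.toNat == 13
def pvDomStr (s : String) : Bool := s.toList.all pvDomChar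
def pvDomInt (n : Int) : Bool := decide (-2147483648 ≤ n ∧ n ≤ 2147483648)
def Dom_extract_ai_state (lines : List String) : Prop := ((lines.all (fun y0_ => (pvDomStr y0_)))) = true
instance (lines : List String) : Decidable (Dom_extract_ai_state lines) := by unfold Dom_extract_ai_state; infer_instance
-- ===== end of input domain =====

-- B replaces A's two reversed scans with a single forward pass that overwrites
-- the two result variables on every match (simpler decomposition; same cost).

-- ===== PORT A =====
-- 'for line in reversed(lines): if p(line): v = line; break' — first match of the reversed list, else ""
def pvLoopBreak (p : String → Bool) : List String → String
  | [] => ""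
  | l :: rest => if p l then l else pvLoopBreak p rest

def extract_ai_state (lines : List String) : String × String :=
  let ai_line := pvLoopBreak (fun line => PySem.Str.isIn "[Sentinel] AI mode=" line) lines.reverse
  let learning_line := pvLoopBreak
    (fun line => PySem.Str.isIn "learning=" line && PySem.Str.isIn "[AI Engine]" line) lines.reverse
  (ai_line, learning_line)

-- ===== PORT B =====
def extract_ai_state_alt (lines : List String) : String × String :=
  lines.foldl (fun s line =>
    (if PySem.Str.isIn "[Sentinel] AI mode=" line then line else s.1,
     if PySem.Str.isIn "learning=" line && PySem.Str.isIn "[AI Engine]" line then line else s.2))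
    ("", "")

-- ===== PRECONDITION & SPEC =====
def Spec_extract_ai_state (lines : List String) (out : String × String) : Prop := out = extract_ai_state_alt lines
instance (lines : List String) (out : String × String) : Decidable (Spec_extract_ai_state lines out) := by unfold Spec_extract_ai_state; infer_instance

-- ===== CLAIM (what is proved, stated in full; the proofs are below) =====
def Claim_equal_extract_ai_state : Prop := ∀ (lines : List String), Dom_extract_ai_state lines → Spec_extract_ai_state lines (extract_ai_state lines)

-- ===== LEMMAS AND PROOFS =====

-- break-loop over xs ++ [a], generalized accumulator form
def pvFind1 (p : String → Bool) : List String → String → String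
  | [], acc => acc
  | l :: rest, acc => if p l then l else pvFind1 p rest acc

theorem pvFind1_append (p : String → Bool) (xs : List String) (a : String) (acc : String) :
    pvFind1 p (xs ++ [a]) acc = pvFind1 p xs (if p a then a else acc) := by
  induction xs with
  | nil => simp [pvFind1]
  | cons x xs ih => by_cases h : p x <;> simp [pvFind1, h, ih]

theorem pvFoldl_eq_find1 (p : String → Bool) (l : List String) (acc : String) :
    l.foldl (fun s line => if p line then line else s) acc = pvFind1 p l.reverse acc := by
  induction l generalizing acc with
  | nil => simp [pvFind1]
  | cons a l ih => simp [List.foldl_cons, ih, pvFind1_append]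

theorem pvFind1_eq_loop (p : String → Bool) (l : List String) :
    pvFind1 p l "" = pvLoopBreak p l := by
  induction l with
  | nil => rfl
  | cons x l ih => by_cases h : p x <;> simp [pvFind1, pvLoopBreak, h, ih]

theorem pvFoldl_pair (g1 g2 : String → String → String) (l : List String) (s : String × String) :
    l.foldl (fun s line => (g1 s.1 line, g2 s.2 line)) s
      = (l.foldl g1 s.1, l.foldl g2 s.2) := by
  induction l generalizing s with
  | nil => rfl
  | cons a l ih => simp [List.foldl_cons, ih]

-- ===== VERDICT (by name: the statement is the Claim_ definition above) =====
theorem extract_ai_state_spec : Claim_equal_extract_ai_state := by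
  intro lines _
  unfold Spec_extract_ai_state extract_ai_state extract_ai_state_alt
  rw [pvFoldl_pair (fun a line => if PySem.Str.isIn "[Sentinel] AI mode=" line then line else a)
        (fun b line => if PySem.Str.isIn "learning=" line && PySem.Str.isIn "[AI Engine]" line then line else b)]
  rw [pvFoldl_eq_find1, pvFoldl_eq_find1, pvFind1_eq_loop, pvFind1_eq_loop]
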